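-- pv_equiv track=rewrite | github.com/RamananVr/Leetcodepython | strings/1933_unknown_title.py | isDecomposable
-- ===== SOURCE A (Python) =====
-- def isDecomposable(s: str) -> bool:
--     count = 0
--     i = 0
--     n = len(s)
--     has_two = False
--
--     while i < n:
--         # Count the length of the current value-equal substring
--         j = i
--         while j < n and s[j] == s[i]:
--             j += 1
--         length = j - i
--
--         # Check if the length is valid
--         if length % 3 == 1:  # Invalid length
--             return False
--         elif length % 3 == 2:  # Length 2 substring
--             if has_two:  # Already found a length 2 substring
--                 return False
--             has_two = True
--
--         # Move to the next group
--         i = j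
--
--     # Ensure exactly one length 2 substring exists
--     return has_two
-- ===== SOURCE B (Python) =====
-- def isDecomposable(s: str) -> bool:
--     # Greedy chunk consumer: repeatedly peel a triple of equal chars; at most
--     # once, peel a pair (when the run ends right after it). Never computes run
--     # lengths or remainders.
--     n = len(s)
--     i = 0
--     used_pair = False
--     while i < n:
--         if i + 2 < n and s[i] == s[i + 1] == s[i + 2]:
--             i += 3
--         elif i + 1 < n and s[i] == s[i + 1] and (i + 2 >= n or s[i + 2] != s[i]) and not used_pair:
--             used_pair = True
--             i += 2
--         else:
--             return False
--     return used_pair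
-- ===== Notes on version B (the rewrite author's own statement) =====
-- stated objective: alternative
-- what changed: Replaces A's run-length-mod-3 analysis (inner loop measuring each maximal run, then remainder tests) by a greedy chunk consumer that repeatedly peels a triple of equal characters and, at most once, a terminal pair; it never computes run lengths or remainders.
import Mathlib
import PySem

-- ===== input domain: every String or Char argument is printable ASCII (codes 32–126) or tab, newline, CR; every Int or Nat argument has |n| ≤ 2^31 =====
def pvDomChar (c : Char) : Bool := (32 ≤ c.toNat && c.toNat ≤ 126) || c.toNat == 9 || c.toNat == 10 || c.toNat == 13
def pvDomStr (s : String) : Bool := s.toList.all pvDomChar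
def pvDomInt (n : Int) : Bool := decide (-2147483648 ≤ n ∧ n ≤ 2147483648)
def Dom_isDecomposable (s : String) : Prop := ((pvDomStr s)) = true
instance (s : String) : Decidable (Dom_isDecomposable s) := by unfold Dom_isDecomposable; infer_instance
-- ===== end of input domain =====

-- B replaces A's run-length-mod-3 analysis by a greedy chunk consumer (peel triples of
-- equal chars, at most once a terminal pair); an alternative algorithm, same cost.

-- ===== PORT A =====
-- A's outer while loop with the inner run-counting loop and early returns.
def pvALoop (l : List Char) (hasTwo : Bool) : Bool :=
  match l with
  | [] => hasTwo
  | c :: rest =>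
    let run := rest.takeWhile (· == c)
    let length := run.length + 1
    if length % 3 == 1 then false
    else if length % 3 == 2 then
      if hasTwo then false
      else pvALoop (rest.drop run.length) true
    else pvALoop (rest.drop run.length) hasTwo
termination_by l.length
decreasing_by all_goals simp only [List.length_drop, List.length_cons]; omega

def isDecomposable (s : String) : Bool := pvALoop s.toList false

-- ===== PORT B =====
-- Source B's greedy while loop: the three lookaheads s[i], s[i+1], s[i+2] become the
-- head patterns; advancing i by 3 (or 2) becomes recursing on the corresponding tail.
def pvBGo (l : List Char) (usedPair : Bool) : Bool :=
  match l with
  | [] => usedPair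
  | [_] => false
  | [a, b] => if a == b && !usedPair then pvBGo [] true else false
  | a :: b :: c :: rest =>
    if a == b && b == c then pvBGo rest usedPair
    else if a == b && !(c == a) && !usedPair then pvBGo (c :: rest) true
    else false
termination_by l.length
decreasing_by all_goals simp only [List.length_cons]; omega

def isDecomposable_alt (s : String) : Bool := pvBGo s.toList false

-- ===== PRECONDITION & SPEC =====
def Spec_isDecomposable (s : String) (out : Bool) : Prop := out = isDecomposable_alt s
instance (s : String) (out : Bool) : Decidable (Spec_isDecomposable s out) := by unfold Spec_isDecomposable; infer_instance

-- ===== CLAIM =====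
def Claim_equal_isDecomposable : Prop := ∀ (s : String), Dom_isDecomposable s → Spec_isDecomposable s (isDecomposable s)

-- ===== LEMMAS AND PROOFS =====

-- Peeling a triple of equal characters does not change A's verdict: the first run of
-- a::a::a::rest is exactly 3 longer than that of rest (or is exactly [a,a,a]), so the
-- run length mod 3 and the remaining tail are unchanged.
theorem pvALoop_cons3 (a : Char) (rest : List Char) (h : Bool) :
    pvALoop (a :: a :: a :: rest) h = pvALoop rest h := by
  match rest with
  | [] => simp [pvALoop]
  | d :: rest' =>
    by_cases hd : d = a
    · subst hd
      conv_lhs => rw [pvALoop]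
      conv_rhs => rw [pvALoop]
      simp only [List.takeWhile_cons, beq_self_eq_true, if_true, List.length_cons,
        List.drop_succ_cons]
      set k := (rest'.takeWhile (· == d)).length with hk
      have h3 : (k + 1 + 1 + 1 + 1) % 3 = (k + 1) % 3 := by omega
      rw [h3]
    · have hda : (d == a) = false := by simp [hd]
      conv_lhs => rw [pvALoop]
      simp only [List.takeWhile_cons, beq_self_eq_true, if_true, hda, Bool.false_eq_true,
        reduceIte, List.length_cons, List.length_nil, List.drop_succ_cons, List.drop_zero]
      norm_num

-- B's greedy consumption agrees with A's run-length scan, by strong induction on length.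
theorem pvBGo_eq (n : Nat) :
    ∀ (l : List Char) (used : Bool), l.length ≤ n → pvBGo l used = pvALoop l used := by
  induction n with
  | zero =>
    intro l used hl
    have : l = [] := List.eq_nil_of_length_eq_zero (Nat.le_zero.mp hl)
    subst this; simp [pvBGo, pvALoop]
  | succ n ih =>
    intro l used hl
    match l with
    | [] => simp [pvBGo, pvALoop]
    | [a] => simp [pvBGo, pvALoop]
    | [a, b] =>
      by_cases hab : a = b
      · subst hab; cases used <;> simp [pvBGo, pvALoop]
      · have : (b == a) = false := beq_eq_false_iff_ne.mpr (Ne.symm hab)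
        cases used <;> simp [pvBGo, pvALoop, this] <;> simp [hab]
    | a :: b :: c :: rest =>
      by_cases hab : a = b
      · subst hab
        by_cases hbc : a = c
        · subst hbc
          rw [pvBGo]
          simp only [beq_self_eq_true, Bool.and_self, if_true]
          rw [pvALoop_cons3]
          exact ih rest used (by simp at hl ⊢; omega)
        · have hca : (c == a) = false := beq_eq_false_iff_ne.mpr (Ne.symm hbc)
          have hac : (a == c) = false := by simp [hbc]
          rw [pvBGo]
          simp only [beq_self_eq_true, hac, Bool.true_and, hca, Bool.not_false,
            Bool.false_eq_true, reduceIte]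
          conv_rhs => rw [pvALoop]
          simp only [List.takeWhile_cons, beq_self_eq_true, if_true, hca, Bool.false_eq_true,
            reduceIte, List.length_cons, List.length_nil, List.drop_succ_cons, List.drop_zero]
          norm_num
          cases used with
          | true => simp
          | false =>
            simp only [Bool.not_false, if_true]
            exact ih (c :: rest) true (by simp at hl ⊢; omega)
      · have hab' : (a == b) = false := by simp [hab]
        rw [pvBGo]
        simp only [hab', Bool.false_and, Bool.false_eq_true, reduceIte]
        have hba : (b == a) = false := beq_eq_false_iff_ne.mpr (Ne.symm hab)
        conv_rhs => rw [pvALoop]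
        simp only [List.takeWhile_cons, hba, Bool.false_eq_true, reduceIte,
          List.length_nil, List.drop_zero]
        norm_num

-- ===== VERDICT =====
theorem isDecomposable_spec : Claim_equal_isDecomposable := by
  intro s _
  unfold Spec_isDecomposable isDecomposable isDecomposable_alt
  exact (pvBGo_eq s.toList.length s.toList false le_rfl).symm
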